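-- pv_equiv track=rewrite | github.com/981377660LMT/algorithm-study | 6_tree/树的性质/树的欧拉路径/最小表示法-括号树-树的欧拉路径/L - Lexicographic Euler Tour-字典序最小欧拉路径.py | lexicoGraphicEulerTour
-- ===== SOURCE A (Python) =====
-- from collections import deque
-- from typing import Deque, List
--
-- def lexicoGraphicEulerTour(adjList: List[List[int]]) -> List[int]:
--     def dfs(cur: int, pre: int, dep: int) -> Deque[int]:
--         sub = sorted([dfs(next, cur, dep + 1) for next in adjList[cur] if next != pre])
--         res = deque([dep])  # !进入
--         for d in sub:
--             if len(res) > len(d):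
--                 while d:
--                     res.append(d.popleft())
--             else:
--                 res, d = d, res
--                 while d:
--                     res.appendleft(d.pop())
--             res.append(dep)  # !回溯
--         return res
--
--     res = dfs(0, -1, 0)
--     return list(res)
-- ===== SOURCE B (Python) =====
-- from typing import List
--
-- def lexicoGraphicEulerTour(adjList: List[List[int]]) -> List[int]:
--     def dfs(cur: int, pre: int, dep: int) -> List[int]:
--         subs = sorted(dfs(nxt, cur, dep + 1) for nxt in adjList[cur] if nxt != pre)
--         return [dep] + [v for d in subs for v in d + [dep]]
--
--     return dfs(0, -1, 0)
-- ===== Notes on version B (the rewrite author's own statement) =====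
-- stated objective: simpler
-- what changed: B drops A's deque machinery and small-to-large splice entirely: the sorted child tours are joined by a single flat list comprehension [dep] + [v for d in subs for v in d + [dep]] instead of A's length-comparing swap-and-pop merge loop.
import Mathlib
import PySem

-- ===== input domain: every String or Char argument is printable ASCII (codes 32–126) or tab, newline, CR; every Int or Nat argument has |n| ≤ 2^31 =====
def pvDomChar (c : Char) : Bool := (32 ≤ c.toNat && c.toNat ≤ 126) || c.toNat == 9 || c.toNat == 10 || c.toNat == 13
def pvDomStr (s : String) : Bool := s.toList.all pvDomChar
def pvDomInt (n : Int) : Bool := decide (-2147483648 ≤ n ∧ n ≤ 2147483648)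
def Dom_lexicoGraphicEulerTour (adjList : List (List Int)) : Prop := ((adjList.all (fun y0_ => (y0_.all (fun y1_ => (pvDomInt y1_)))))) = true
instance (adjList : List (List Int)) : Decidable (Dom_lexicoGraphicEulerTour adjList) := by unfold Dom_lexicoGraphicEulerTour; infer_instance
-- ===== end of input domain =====

-- B replaces A's deque small-to-large splice with a plain list built by a flat comprehension
-- ([dep] + [v for d in subs for v in d + [dep]]): same recursive sorted-children DFS, simpler merge.

-- ===== PORT A =====
-- 'while d: res.append(d.popleft())' — pop from the front of d, push to the back of res
def pvPopAll (res d : List Int) : List Int :=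
  match d with
  | [] => res
  | x :: xs => pvPopAll (res ++ [x]) xs

-- after 'res, d = d, res': 'while d: res.appendleft(d.pop())' — pop from the back of d, push to the front of res
def pvPrependAll (res d : List Int) : List Int :=
  if d.isEmpty then res
  else pvPrependAll (d.getLast! :: res) d.dropLast
termination_by d.length
decreasing_by
  rename_i h
  cases d with
  | nil => simp at h
  | cons a as => simp

-- dfs of A, with fuel making the recursion total; on inputs satisfying Pre_ the
-- non-backtracking (vertex, parent) transition graph is acyclic, so the recursion depth is
-- at most the number of reachable states (≤ 2·#entries + 1) and fuel 0 is never reached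
def pvDfsA (adjList : List (List Int)) (fuel : Nat) (cur pre dep : Int) : List Int :=
  match fuel with
  | 0 => []
  | Nat.succ fuel =>
    let sub := PySem.List.sorted
      ((((PySem.List.pyGet? adjList cur).getD []).filter (fun nx => nx ≠ pre)).map
        (fun nx => pvDfsA adjList fuel nx cur (dep + 1))) (fun x => x) false
    sub.foldl (fun res d =>
      (if res.length > d.length then pvPopAll res d else pvPrependAll d res) ++ [dep]) [dep]

def pvFuel (adjList : List (List Int)) : Nat := 2 * (adjList.map List.length).sum + 2

def lexicoGraphicEulerTour (adjList : List (List Int)) : List Int :=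
  pvDfsA adjList (pvFuel adjList) 0 (-1) 0

-- ===== PORT B =====
def pvDfsB (adjList : List (List Int)) (fuel : Nat) (cur pre dep : Int) : List Int :=
  match fuel with
  | 0 => []
  | Nat.succ fuel =>
    let subs := PySem.List.sorted
      ((((PySem.List.pyGet? adjList cur).getD []).filter (fun nx => nx ≠ pre)).map
        (fun nx => pvDfsB adjList fuel nx cur (dep + 1))) (fun x => x) false
    dep :: subs.flatMap (fun d => d ++ [dep])

def lexicoGraphicEulerTour_alt (adjList : List (List Int)) : List Int :=
  pvDfsB adjList (pvFuel adjList) 0 (-1) 0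

-- ===== PRECONDITION & SPEC =====
-- A's recursion moves between states (cur, pre); its successor states, exactly as A filters them
def pvSuccs (adjList : List (List Int)) (s : Int × Int) : List (Int × Int) :=
  (((PySem.List.pyGet? adjList s.1).getD []).filter (fun t => t ≠ s.2)).map (fun t => (t, s.1))

-- states reachable from the start state (0, -1): iterate one-step expansion to the fixpoint
-- (2·#entries + 2 iterations suffice: each non-fixpoint step adds a state, and at most
-- 2·#entries + 1 distinct states are reachable)
def pvReach (adjList : List (List Int)) : List (Int × Int) :=
  (fun R => (R ++ R.flatMap (pvSuccs adjList)).dedup)^[2 * (adjList.map List.length).sum + 2]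
    [(0, -1)]

-- repeatedly discard states all of whose walks die out; the fixpoint is nonempty exactly
-- when some reachable state lies on or leads to a cycle of the transition graph
def pvCore (adjList : List (List Int)) : List (Int × Int) :=
  (fun T => T.filter (fun s => (pvSuccs adjList s).any (fun t => decide (t ∈ T))))^[
    (pvReach adjList).length] (pvReach adjList)

-- A returns normally exactly when every vertex its DFS reaches is a valid (possibly negative)
-- index and no reachable non-backtracking walk can cycle; on everything else A raises
-- IndexError or RecursionError, so Pre_ is the in-range condition on the reachable states
-- plus acyclicity of the reachable transition graph.
def Pre_lexicoGraphicEulerTour (adjList : List (List Int)) : Prop :=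
  (∀ s ∈ pvReach adjList, -(adjList.length : Int) ≤ s.1 ∧ s.1 < (adjList.length : Int)) ∧
  pvCore adjList = []
instance (adjList : List (List Int)) : Decidable (Pre_lexicoGraphicEulerTour adjList) := by
  unfold Pre_lexicoGraphicEulerTour; infer_instance

def pvWitness_lexicoGraphicEulerTour : List (List Int) := [[2, 1], [0], [0, 3], [2]]

def Spec_lexicoGraphicEulerTour (adjList : List (List Int)) (out : List Int) : Prop := out = lexicoGraphicEulerTour_alt adjList
instance (adjList : List (List Int)) (out : List Int) : Decidable (Spec_lexicoGraphicEulerTour adjList out) := by unfold Spec_lexicoGraphicEulerTour; infer_instance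

-- ===== CLAIM (what is proved, stated in full; the proofs are below) =====
def Claim_equal_lexicoGraphicEulerTour : Prop := ∀ (adjList : List (List Int)), Dom_lexicoGraphicEulerTour adjList → Pre_lexicoGraphicEulerTour adjList → Spec_lexicoGraphicEulerTour adjList (lexicoGraphicEulerTour adjList)

-- ===== LEMMAS AND PROOFS =====
lemma pvPopAll_eq (d res : List Int) : pvPopAll res d = res ++ d := by
  induction d generalizing res with
  | nil => simp [pvPopAll]
  | cons x xs ih => simp [pvPopAll, ih]

lemma pvPrependAll_eq (d res : List Int) : pvPrependAll res d = d ++ res := by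
  induction d using List.reverseRecOn generalizing res with
  | nil => simp [pvPrependAll]
  | append_singleton ys y ih =>
    rw [pvPrependAll]
    simp [ih]

lemma pvDfs_eq (adjList : List (List Int)) (fuel : Nat) :
    ∀ cur pre dep, pvDfsA adjList fuel cur pre dep = pvDfsB adjList fuel cur pre dep := by
  induction fuel with
  | zero => intro cur pre dep; rfl
  | succ fuel ih =>
    intro cur pre dep
    rw [pvDfsA, pvDfsB]
    have hmap :
        (((PySem.List.pyGet? adjList cur).getD []).filter (fun nx => nx ≠ pre)).map
            (fun nx => pvDfsA adjList fuel nx cur (dep + 1)) =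
        (((PySem.List.pyGet? adjList cur).getD []).filter (fun nx => nx ≠ pre)).map
            (fun nx => pvDfsB adjList fuel nx cur (dep + 1)) := by
      exact List.map_congr_left (fun nx _ => ih nx cur (dep + 1))
    rw [hmap]
    have hstep :
        (fun (res d : List Int) =>
            (if res.length > d.length then pvPopAll res d else pvPrependAll d res) ++ [dep]) =
        (fun (res d : List Int) => res ++ (d ++ [dep])) := by
      funext res d
      split_ifs with h
      · rw [pvPopAll_eq, List.append_assoc]
      · rw [pvPrependAll_eq, List.append_assoc]
    rw [hstep, PySem.List.foldl_append_eq_flatMap (fun d => d ++ [dep])]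
    rfl

-- ===== VERDICT (by name: the statement is the Claim_ definition above) =====
theorem lexicoGraphicEulerTour_spec : Claim_equal_lexicoGraphicEulerTour := by
  intro adjList _ _
  unfold Spec_lexicoGraphicEulerTour lexicoGraphicEulerTour lexicoGraphicEulerTour_alt
  exact pvDfs_eq adjList (pvFuel adjList) 0 (-1) 0
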